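-- pv_equiv track=rewrite | github.com/pynbody/tangos | tangos/input_handlers/__init__.py | strip_slashes
-- ===== SOURCE A (Python) =====
-- def strip_slashes(name):
--     """Strip trailing and leading slashes from relative path"""
--     if len(name) == 0: return name
--     while name[0] == "/":
--         name = name[1:]
--         if len(name) == 0: return name
--     while name[-1] == "/":
--         name = name[:-1]
--         if len(name) == 0: return name
--     return name
-- ===== SOURCE B (Python) =====
-- def strip_slashes(name):
--     """Strip trailing and leading slashes from relative path"""
--     n = len(name)
--     start = 0
--     while start < n and name[start] == "/":
--         start += 1
--     end = n
--     while start < end and name[end - 1] == "/":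
--         end -= 1
--     return name[start:end]
-- ===== Notes on version B (the rewrite author's own statement) =====
-- stated objective: alternative
-- what changed: Replaces A's repeated one-character slicing loops (which rebuild the string each step) with a two-pointer boundary scan followed by a single slice.
import Mathlib
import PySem

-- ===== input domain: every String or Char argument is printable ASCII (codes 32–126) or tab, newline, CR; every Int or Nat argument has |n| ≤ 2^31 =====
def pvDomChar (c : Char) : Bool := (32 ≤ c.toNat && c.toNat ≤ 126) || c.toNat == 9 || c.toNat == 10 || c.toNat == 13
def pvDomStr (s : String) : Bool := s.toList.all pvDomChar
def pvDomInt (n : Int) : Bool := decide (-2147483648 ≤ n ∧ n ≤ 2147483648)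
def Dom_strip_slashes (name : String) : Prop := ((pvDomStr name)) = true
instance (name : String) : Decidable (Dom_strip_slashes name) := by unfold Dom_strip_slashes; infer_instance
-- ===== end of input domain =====

-- B replaces A's repeated one-character slicing loops with a two-pointer boundary scan and a single slice (alternative decomposition).


-- ===== PORT A =====
-- while name[0] == "/": name = name[1:]  (early return on empty)
def pvA_lead : List Char → List Char
  | [] => []
  | c :: cs => if c == '/' then pvA_lead cs else c :: cs

-- while name[-1] == "/": name = name[:-1]  (early return on empty)
def pvA_trail (cs : List Char) : List Char :=
  match h : cs.getLast? with
  | some c => if c == '/' then pvA_trail cs.dropLast else cs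
  | none => cs
termination_by cs.length
decreasing_by
  cases cs with
  | nil => simp at h
  | cons a as => simp [List.length_dropLast]

def strip_slashes (name : String) : String :=
  if name.toList.length = 0 then name
  else String.ofList (pvA_trail (pvA_lead name.toList))

-- ===== PORT B =====
-- start = 0; while start < n and name[start] == "/": start += 1
def pvB_start (cs : List Char) (i : Nat) : Nat :=
  if h : i < cs.length then
    if cs[i] == '/' then pvB_start cs (i + 1) else i
  else i
termination_by cs.length - i

-- end = n; while start < end and name[end-1] == "/": end -= 1
-- (name[end-1] ported as getD; the loop guard keeps the index in range on every call)
def pvB_end (cs : List Char) (start e : Nat) : Nat :=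
  if start < e then
    if cs.getD (e - 1) ' ' == '/' then pvB_end cs start (e - 1) else e
  else e
termination_by e

-- name[start:end] with 0 ≤ start ≤ end ≤ n is exactly (drop start).take (end-start)
def strip_slashes_alt (name : String) : String :=
  let cs := name.toList
  let s := pvB_start cs 0
  let e := pvB_end cs s cs.length
  String.ofList ((cs.drop s).take (e - s))

-- ===== PRECONDITION & SPEC =====
def Spec_strip_slashes (name : String) (out : String) : Prop := out = strip_slashes_alt name
instance (name : String) (out : String) : Decidable (Spec_strip_slashes name out) := by unfold Spec_strip_slashes; infer_instance

-- ===== CLAIM (what is proved, stated in full; the proofs are below) =====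
def Claim_equal_strip_slashes : Prop := ∀ (name : String), Dom_strip_slashes name → Spec_strip_slashes name (strip_slashes name)

-- ===== LEMMAS AND PROOFS =====

theorem pvB_start_le (cs : List Char) (i : Nat) (hi : i ≤ cs.length) :
    i ≤ pvB_start cs i ∧ pvB_start cs i ≤ cs.length := by
  unfold pvB_start
  split
  · split
    · have := pvB_start_le cs (i + 1) (by omega)
      omega
    · omega
  · omega
termination_by cs.length - i

theorem pvA_lead_eq (cs : List Char) (i : Nat) (hi : i ≤ cs.length) :
    pvA_lead (cs.drop i) = cs.drop (pvB_start cs i) := by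
  unfold pvB_start
  split
  · rename_i h
    have hd : cs.drop i = cs[i] :: cs.drop (i + 1) := List.drop_eq_getElem_cons h
    split
    · rename_i hc
      rw [hd]
      simp only [pvA_lead, hc, if_pos]
      exact pvA_lead_eq cs (i + 1) (by omega)
    · rename_i hc
      rw [hd]
      simp [pvA_lead, hc]
  · rename_i h
    have : i = cs.length := by omega
    simp [this, pvA_lead]
termination_by cs.length - i

theorem pvB_end_bounds (cs : List Char) (s e : Nat) (hs : s ≤ e) :
    s ≤ pvB_end cs s e ∧ pvB_end cs s e ≤ e := by
  unfold pvB_end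
  split
  · split
    · have := pvB_end_bounds cs s (e - 1) (by omega)
      omega
    · omega
  · omega
termination_by e

theorem pvA_trail_eq (cs : List Char) (s e : Nat) (hs : s ≤ e) (he : e ≤ cs.length) :
    pvA_trail ((cs.drop s).take (e - s)) = (cs.drop s).take (pvB_end cs s e - s) := by
  unfold pvB_end
  by_cases hse : s < e
  · rw [if_pos hse]
    have hlen : ((cs.drop s).take (e - s)).length = e - s := by
      simp; omega
    have hpos : 0 < ((cs.drop s).take (e - s)).length := by omega
    have hne : (cs.drop s).take (e - s) ≠ [] := by
      intro hnil; rw [hnil] at hpos; simp at hpos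
    have hget : ((cs.drop s).take (e - s)).getLast? = some cs[e - 1] := by
      rw [List.getLast?_eq_getElem?]
      rw [List.getElem?_eq_getElem (by omega)]
      congr 1
      rw [List.getElem_take, List.getElem_drop]
      congr 1
      omega
    have hgd : cs.getD (e - 1) ' ' = cs[e - 1] := List.getD_eq_getElem cs ' ' (by omega)
    unfold pvA_trail
    rw [hget]
    simp only [hgd]
    by_cases hc : cs[e - 1] = '/'
    · rw [if_pos (by simp [hc]), if_pos (by simp [hc])]
      have hdl : ((cs.drop s).take (e - s)).dropLast = (cs.drop s).take (e - 1 - s) := by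
        rw [List.dropLast_eq_take]
        rw [List.take_take]
        congr 1
        omega
      rw [hdl]
      exact pvA_trail_eq cs s (e - 1) (by omega) (by omega)
    · rw [if_neg (by simp [hc]), if_neg (by simp [hc])]
  · rw [if_neg hse]
    have : e - s = 0 := by omega
    simp [this, pvA_trail]
termination_by e

theorem strip_slashes_eq (name : String) : strip_slashes name = strip_slashes_alt name := by
  unfold strip_slashes strip_slashes_alt
  set cs := name.toList with hcs
  by_cases h0 : cs.length = 0
  · have hnil : cs = [] := List.eq_nil_of_length_eq_zero h0
    have hname : name = String.ofList cs := by rw [hcs]; exact String.ofList_toList.symm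
    rw [hnil]
    simp only [List.length_nil, hname, hnil, if_pos]
    simp [pvB_start, pvB_end]
  · rw [if_neg h0]
    have hs := pvB_start_le cs 0 (by omega)
    set s := pvB_start cs 0 with hsdef
    have he := pvB_end_bounds cs s cs.length hs.2
    have h1 : pvA_lead cs = cs.drop s := by
      have := pvA_lead_eq cs 0 (by omega)
      simpa using this
    have h2 : cs.drop s = (cs.drop s).take (cs.length - s) := by
      rw [List.take_of_length_le]
      simp
    rw [h1, h2, pvA_trail_eq cs s cs.length hs.2 le_rfl]

-- ===== VERDICT (by name: the statement is the Claim_ definition above) =====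
theorem strip_slashes_spec : Claim_equal_strip_slashes := by
  intro name _
  unfold Spec_strip_slashes
  exact strip_slashes_eq name
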